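-- pv_equiv track=rewrite | github.com/dask/distributed | distributed/diagnostics/progress.py | dependent_keys
-- ===== SOURCE A (Python) =====
-- def dependent_keys(keys, who_has, processing, dependencies, exceptions,
--                    complete=False):
--     """ All keys that need to compute for these keys to finish """
--     out = set()
--     errors = set()
--     stack = list(keys)
--     while stack:
--         key = stack.pop()
--         if key in out:
--             continue
--         if not complete and (who_has.get(key) or
--                              key in processing):
--             continue
--         if key in exceptions:
--             errors.add(key)
--             if not complete:
--                 continue
--
--         out.add(key)
--         stack.extend(dependencies.get(key, []))
--     return out, errors
-- ===== SOURCE B (Python) =====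
-- def dependent_keys(keys, who_has, processing, dependencies, exceptions,
--                    complete=False):
--     """ All keys that need to compute for these keys to finish """
--     # Recursive depth-first search with a nested visitor instead of an
--     # explicit stack loop.  Traversal order (reversed) matches A's stack pop
--     # order; it has no observable effect on the returned sets.
--     out = set()
--     errors = set()
--
--     def visit(key):
--         if key in out:
--             return
--         if not complete and (who_has.get(key) or key in processing):
--             return
--         if key in exceptions:
--             errors.add(key)
--             if not complete:
--                 return
--         out.add(key)
--         for dep in reversed(dependencies.get(key, ())):
--             visit(dep)
--
--     for key in reversed(keys):
--         visit(key)
--     return out, errors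
-- ===== Notes on version B (the rewrite author's own statement) =====
-- stated objective: alternative
-- what changed: Replaces the explicit worklist loop (stack = list(keys); while stack: pop/extend) by a recursive DFS with a nested visit(key) helper that closes over the out/errors sets and recurses on each dependency.
import Mathlib
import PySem

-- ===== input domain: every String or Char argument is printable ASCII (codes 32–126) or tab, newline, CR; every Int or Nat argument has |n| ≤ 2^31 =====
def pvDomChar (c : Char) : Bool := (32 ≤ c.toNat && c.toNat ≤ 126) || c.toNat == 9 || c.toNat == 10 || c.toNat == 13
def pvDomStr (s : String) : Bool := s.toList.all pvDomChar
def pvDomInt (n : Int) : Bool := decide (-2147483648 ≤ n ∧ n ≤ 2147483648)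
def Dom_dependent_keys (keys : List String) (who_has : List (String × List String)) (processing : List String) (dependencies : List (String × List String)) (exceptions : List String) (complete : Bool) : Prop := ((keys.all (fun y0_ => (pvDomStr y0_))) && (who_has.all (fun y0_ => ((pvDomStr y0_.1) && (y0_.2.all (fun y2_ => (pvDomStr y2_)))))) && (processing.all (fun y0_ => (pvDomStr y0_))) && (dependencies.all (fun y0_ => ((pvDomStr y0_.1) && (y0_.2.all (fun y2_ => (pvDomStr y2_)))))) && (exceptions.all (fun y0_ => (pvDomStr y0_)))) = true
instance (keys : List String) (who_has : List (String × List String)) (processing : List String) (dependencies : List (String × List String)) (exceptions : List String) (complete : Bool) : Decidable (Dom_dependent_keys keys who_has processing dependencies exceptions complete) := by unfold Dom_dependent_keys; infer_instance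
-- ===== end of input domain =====

-- B replaces A's explicit stack worklist loop by a recursive DFS with a nested visit helper; same cost, different decomposition (objective: alternative).

-- Fuel bound for the traversal: the initial stack plus every dependency list can be
-- pushed/visited at most once, so this many processing steps always suffice.
def depFuel (keys : List String) (dependencies : List (String × List String)) : Nat :=
  keys.length + dependencies.foldl (fun a p => a + p.2.length) 0 + 1

-- ===== PORT A =====
-- A's while-loop over the stack (Python list, pop() from the end), one fuel unit per pop.
def depLoopA (who_has : PySem.Dict String (List String)) (processing : List String)
    (dependencies : PySem.Dict String (List String)) (exceptions : List String)
    (complete : Bool) :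
    Nat → List String → PySem.Set String → PySem.Set String → List String × List String
  | 0, _, out, errors => (out, errors)
  | f+1, stack, out, errors =>
    match PySem.List.pop? stack with
    | none => (out, errors)                     -- while stack: loop exits
    | some (key, rest) =>
      if PySem.Set.contains out key then
        depLoopA who_has processing dependencies exceptions complete f rest out errors
      else if !complete && (!(who_has.getD key []).isEmpty || processing.contains key) then
        depLoopA who_has processing dependencies exceptions complete f rest out errors
      else
        let errors' := if exceptions.contains key then PySem.Set.add errors key else errors
        if exceptions.contains key && !complete then
          depLoopA who_has processing dependencies exceptions complete f rest out errors'
        else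
          depLoopA who_has processing dependencies exceptions complete f
            (rest ++ dependencies.getD key []) (PySem.Set.add out key) errors'

def dependent_keys (keys : List String) (who_has : List (String × List String)) (processing : List String) (dependencies : List (String × List String)) (exceptions : List String) (complete : Bool) : List String × List String :=
  depLoopA (PySem.Dict.mk who_has) processing (PySem.Dict.mk dependencies) exceptions complete
    (depFuel keys dependencies) keys PySem.Set.empty PySem.Set.empty

-- ===== PORT B =====
-- B's nested recursive visitor; the result carries the remaining fuel (one unit per
-- visit call) together with a proof that fuel never grows, which drives termination.
mutual
def visitB (who_has : PySem.Dict String (List String)) (processing : List String)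
    (dependencies : PySem.Dict String (List String)) (exceptions : List String)
    (complete : Bool) :
    (f : Nat) → String → PySem.Set String → PySem.Set String →
      {r : (List String × List String) × Nat // r.2 ≤ f}
  | 0, _, out, errors => ⟨((out, errors), 0), Nat.le_refl 0⟩
  | f+1, key, out, errors =>
    if PySem.Set.contains out key then ⟨((out, errors), f), Nat.le_succ f⟩
    else if !complete && (!(who_has.getD key []).isEmpty || processing.contains key) then
      ⟨((out, errors), f), Nat.le_succ f⟩
    else
      let errors' := if exceptions.contains key then PySem.Set.add errors key else errors
      if exceptions.contains key && !complete then ⟨((out, errors'), f), Nat.le_succ f⟩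
      else
        let r := visitListB who_has processing dependencies exceptions complete f
          (dependencies.getD key []).reverse (PySem.Set.add out key) errors'
        ⟨r.val, Nat.le_succ_of_le r.property⟩
termination_by f key out errors => (f, 0)
decreasing_by
  all_goals exact Prod.Lex.left _ _ (Nat.lt_succ_self f)

def visitListB (who_has : PySem.Dict String (List String)) (processing : List String)
    (dependencies : PySem.Dict String (List String)) (exceptions : List String)
    (complete : Bool) :
    (f : Nat) → List String → PySem.Set String → PySem.Set String →
      {r : (List String × List String) × Nat // r.2 ≤ f}
  | f, [], out, errors => ⟨((out, errors), f), Nat.le_refl f⟩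
  | f, key :: ks, out, errors =>
    let r1 := visitB who_has processing dependencies exceptions complete f key out errors
    let r2 := visitListB who_has processing dependencies exceptions complete
      r1.val.2 ks r1.val.1.1 r1.val.1.2
    ⟨r2.val, Nat.le_trans r2.property r1.property⟩
termination_by f ks out errors => (f, ks.length + 1)
decreasing_by
  · exact Prod.Lex.right _ (Nat.succ_pos _)
  · rcases Nat.lt_or_ge r1.val.2 f with h' | h'
    · exact Prod.Lex.left _ _ h'
    · have heq : r1.val.2 = f := Nat.le_antisymm r1.property h'
      rw [heq]
      exact Prod.Lex.right _ (Nat.lt_succ_self _)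
end

def dependent_keys_alt (keys : List String) (who_has : List (String × List String)) (processing : List String) (dependencies : List (String × List String)) (exceptions : List String) (complete : Bool) : List String × List String :=
  (visitListB (PySem.Dict.mk who_has) processing (PySem.Dict.mk dependencies) exceptions complete
    (depFuel keys dependencies) keys.reverse PySem.Set.empty PySem.Set.empty).val.1

-- ===== PRECONDITION & SPEC =====
def Spec_dependent_keys (keys : List String) (who_has : List (String × List String)) (processing : List String) (dependencies : List (String × List String)) (exceptions : List String) (complete : Bool) (out : List String × List String) : Prop := out = dependent_keys_alt keys who_has processing dependencies exceptions complete
instance (keys : List String) (who_has : List (String × List String)) (processing : List String) (dependencies : List (String × List String)) (exceptions : List String) (complete : Bool) (out : List String × List String) : Decidable (Spec_dependent_keys keys who_has processing dependencies exceptions complete out) := by unfold Spec_dependent_keys; infer_instance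

-- ===== CLAIM (what is proved, stated in full; the proofs are below) =====
def Claim_equal_dependent_keys : Prop := ∀ (keys : List String) (who_has : List (String × List String)) (processing : List String) (dependencies : List (String × List String)) (exceptions : List String) (complete : Bool), Dom_dependent_keys keys who_has processing dependencies exceptions complete → Spec_dependent_keys keys who_has processing dependencies exceptions complete (dependent_keys keys who_has processing dependencies exceptions complete)

-- ===== LEMMAS AND PROOFS =====

-- Unfolding lemmas for the mutual well-founded definitions.
lemma visitListB_nil (wh : PySem.Dict String (List String)) (pr : List String)
    (dp : PySem.Dict String (List String)) (ex : List String) (cm : Bool)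
    (f : Nat) (o e : PySem.Set String) :
    (visitListB wh pr dp ex cm f [] o e).val = ((o, e), f) := by
  rw [visitListB]

lemma visitListB_cons (wh : PySem.Dict String (List String)) (pr : List String)
    (dp : PySem.Dict String (List String)) (ex : List String) (cm : Bool)
    (f : Nat) (k : String) (ks : List String) (o e : PySem.Set String) :
    (visitListB wh pr dp ex cm f (k :: ks) o e).val =
      (visitListB wh pr dp ex cm (visitB wh pr dp ex cm f k o e).val.2 ks
        (visitB wh pr dp ex cm f k o e).val.1.1
        (visitB wh pr dp ex cm f k o e).val.1.2).val := by
  rw [visitListB]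

lemma visitB_zero (wh : PySem.Dict String (List String)) (pr : List String)
    (dp : PySem.Dict String (List String)) (ex : List String) (cm : Bool)
    (k : String) (o e : PySem.Set String) :
    (visitB wh pr dp ex cm 0 k o e).val = ((o, e), 0) := by
  rw [visitB]

lemma visitB_succ_skip (wh : PySem.Dict String (List String)) (pr : List String)
    (dp : PySem.Dict String (List String)) (ex : List String) (cm : Bool)
    (f : Nat) (k : String) (o e : PySem.Set String)
    (h : PySem.Set.contains o k = true ∨
      (!cm && (!(wh.getD k []).isEmpty || pr.contains k)) = true) :
    (visitB wh pr dp ex cm (f + 1) k o e).val = ((o, e), f) := by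
  rw [visitB]
  rcases h with h | h
  · simp_all
  · by_cases h1 : PySem.Set.contains o k = true <;> simp_all

lemma visitB_succ_err (wh : PySem.Dict String (List String)) (pr : List String)
    (dp : PySem.Dict String (List String)) (ex : List String) (cm : Bool)
    (f : Nat) (k : String) (o e : PySem.Set String)
    (h1 : ¬ PySem.Set.contains o k = true)
    (h2 : ¬ (!cm && (!(wh.getD k []).isEmpty || pr.contains k)) = true)
    (h3 : (ex.contains k && !cm) = true) :
    (visitB wh pr dp ex cm (f + 1) k o e).val =
      ((o, if ex.contains k then PySem.Set.add e k else e), f) := by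
  rw [visitB]
  simp_all

lemma visitB_succ_go (wh : PySem.Dict String (List String)) (pr : List String)
    (dp : PySem.Dict String (List String)) (ex : List String) (cm : Bool)
    (f : Nat) (k : String) (o e : PySem.Set String)
    (h1 : ¬ PySem.Set.contains o k = true)
    (h2 : ¬ (!cm && (!(wh.getD k []).isEmpty || pr.contains k)) = true)
    (h3 : ¬ (ex.contains k && !cm) = true) :
    (visitB wh pr dp ex cm (f + 1) k o e).val =
      (visitListB wh pr dp ex cm f (dp.getD k []).reverse (PySem.Set.add o k)
        (if ex.contains k then PySem.Set.add e k else e)).val := by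
  rw [visitB]
  simp_all
  split_ifs <;> simp_all

-- With no fuel, the visitor is the identity on the state.
lemma visitListB_zero (wh : PySem.Dict String (List String)) (pr : List String)
    (dp : PySem.Dict String (List String)) (ex : List String) (cm : Bool)
    (rs : List String) (o e : PySem.Set String) :
    (visitListB wh pr dp ex cm 0 rs o e).val = ((o, e), 0) := by
  induction rs with
  | nil => rw [visitListB_nil]
  | cons k ks ih => rw [visitListB_cons, visitB_zero]; exact ih

-- Visiting a concatenated list is visiting the first part, then the second.
lemma visitListB_append (wh : PySem.Dict String (List String)) (pr : List String)
    (dp : PySem.Dict String (List String)) (ex : List String) (cm : Bool)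
    (a : List String) :
    ∀ (b : List String) (f : Nat) (o e : PySem.Set String),
      (visitListB wh pr dp ex cm f (a ++ b) o e).val =
        (visitListB wh pr dp ex cm (visitListB wh pr dp ex cm f a o e).val.2 b
          (visitListB wh pr dp ex cm f a o e).val.1.1
          (visitListB wh pr dp ex cm f a o e).val.1.2).val := by
  induction a with
  | nil =>
    intro b f o e
    rw [List.nil_append, visitListB_nil]
  | cons k ks ih =>
    intro b f o e
    rw [List.cons_append, visitListB_cons, visitListB_cons, ih]

-- Core simulation: A's stack loop on a reversed worklist equals B's recursive visitor.
lemma loop_eq_visitList (wh : PySem.Dict String (List String)) (pr : List String)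
    (dp : PySem.Dict String (List String)) (ex : List String) (cm : Bool) :
    ∀ (f : Nat) (rs : List String) (o e : PySem.Set String),
      depLoopA wh pr dp ex cm f rs.reverse o e =
        (visitListB wh pr dp ex cm f rs o e).val.1 := by
  intro f
  induction f with
  | zero =>
    intro rs o e
    rw [visitListB_zero]
    simp [depLoopA]
  | succ g ih =>
    intro rs o e
    cases rs with
    | nil =>
      rw [List.reverse_nil, visitListB_nil]
      simp [depLoopA, PySem.List.pop?]
    | cons k ks =>
      have hpop : PySem.List.pop? (List.reverse (k :: ks)) = some (k, ks.reverse) := by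
        rw [List.reverse_cons]; exact PySem.List.pop?_last ks.reverse k
      rw [visitListB_cons]
      simp only [depLoopA, hpop]
      by_cases h1 : PySem.Set.contains o k = true
      · rw [visitB_succ_skip wh pr dp ex cm g k o e (Or.inl h1)]
        simp only [h1, if_true]
        exact ih ks o e
      · by_cases h2 : (!cm && (!(wh.getD k []).isEmpty || pr.contains k)) = true
        · rw [visitB_succ_skip wh pr dp ex cm g k o e (Or.inr h2)]
          simp only [h1, h2, if_true, if_false, Bool.false_eq_true]
          exact ih ks o e
        · by_cases h3 : (ex.contains k && !cm) = true
          · rw [visitB_succ_err wh pr dp ex cm g k o e h1 h2 h3]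
            simp only [h1, h2, h3, if_true, if_false, Bool.false_eq_true]
            exact ih ks o _
          · rw [visitB_succ_go wh pr dp ex cm g k o e h1 h2 h3]
            simp only [h1, h2, h3, if_false, Bool.false_eq_true]
            have hrw : ks.reverse ++ dp.getD k [] =
                ((dp.getD k []).reverse ++ ks).reverse := by simp
            rw [hrw, ih ((dp.getD k []).reverse ++ ks)]
            rw [visitListB_append]

-- ===== VERDICT (by name: the statement is the Claim_ definition above) =====
theorem dependent_keys_spec : Claim_equal_dependent_keys := by
  intro keys who_has processing dependencies exceptions complete _
  unfold Spec_dependent_keys dependent_keys dependent_keys_alt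
  have := loop_eq_visitList (PySem.Dict.mk who_has) processing (PySem.Dict.mk dependencies)
    exceptions complete (depFuel keys dependencies) keys.reverse PySem.Set.empty PySem.Set.empty
  rwa [List.reverse_reverse] at this
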